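-- pv_equiv track=rewrite | github.com/dragonspider1991/Intrinsic-Resonance-Holography- | orchestrator.py | generate_suggested_fix
-- ===== SOURCE A (Python) =====
-- def generate_suggested_fix(error_type: str, error_message: str) -> str:
--     """Generate context-specific suggested fixes based on error type."""
--     suggestions = []
--
--     if "ModuleNotFoundError" in error_type or "ImportError" in error_type:
--         # Extract module name from error message
--         if "No module named" in error_message:
--             module_name = error_message.split("No module named")[1].strip().strip("'\"")
--             suggestions.append(f"Install missing module: pip install {module_name}")
--         suggestions.append("Ensure all dependencies are installed: pip install -r requirements.txt")
--         suggestions.append("If in a virtual environment, ensure it's activated")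
--
--     elif "MemoryError" in error_type:
--         suggestions.append("Lower the grid size N (try reducing by factor of 2)")
--         suggestions.append("Current N might be too large for available RAM")
--         suggestions.append("Consider using a machine with more RAM or enabling swap")
--         suggestions.append("Try setting use_gpu=True if GPU is available")
--
--     elif "FileNotFoundError" in error_type:
--         suggestions.append("Ensure you're running from the repository root directory")
--         suggestions.append("Check that all required files exist in src/core/")
--         suggestions.append("Re-clone the repository if files are missing")
--
--     elif "RuntimeError" in error_type and "CUDA" in error_message:
--         suggestions.append("GPU/CUDA error detected")
--         suggestions.append("Set use_gpu=False in config to use CPU instead")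
--         suggestions.append("Verify CUDA installation: nvidia-smi")
--
--     elif "KeyboardInterrupt" in error_type:
--         suggestions.append("Process was interrupted by user (Ctrl+C)")
--         suggestions.append("This is normal if you intentionally stopped the process")
--
--     else:
--         suggestions.append("Review the stack trace for specific error location")
--         suggestions.append("Check that input parameters are valid")
--         suggestions.append("Try running with output_verbosity='debug' for more information")
--
--     return "\n".join(f"  - {s}" for s in suggestions)
-- ===== SOURCE B (Python) =====
-- # Two-stage design: a keyword->category classifier, then a lookup of precomputed,
-- # already-joined suggestion texts (no list building / join at call time).
--
-- _TEXT = {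
--     "import": "  - Ensure all dependencies are installed: pip install -r requirements.txt\n"
--               "  - If in a virtual environment, ensure it's activated",
--     "memory": "  - Lower the grid size N (try reducing by factor of 2)\n"
--               "  - Current N might be too large for available RAM\n"
--               "  - Consider using a machine with more RAM or enabling swap\n"
--               "  - Try setting use_gpu=True if GPU is available",
--     "file": "  - Ensure you're running from the repository root directory\n"
--             "  - Check that all required files exist in src/core/\n"
--             "  - Re-clone the repository if files are missing",
--     "cuda": "  - GPU/CUDA error detected\n"
--             "  - Set use_gpu=False in config to use CPU instead\n"
--             "  - Verify CUDA installation: nvidia-smi",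
--     "interrupt": "  - Process was interrupted by user (Ctrl+C)\n"
--                  "  - This is normal if you intentionally stopped the process",
--     "default": "  - Review the stack trace for specific error location\n"
--                "  - Check that input parameters are valid\n"
--                "  - Try running with output_verbosity='debug' for more information",
-- }
--
-- _KEYWORDS = [
--     ("ModuleNotFoundError", "import"),
--     ("ImportError", "import"),
--     ("MemoryError", "memory"),
--     ("FileNotFoundError", "file"),
--     ("RuntimeError", "cuda"),
--     ("KeyboardInterrupt", "interrupt"),
-- ]
--
--
-- def _classify(error_type: str, error_message: str) -> str:
--     for keyword, category in _KEYWORDS: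
--         if keyword in error_type and (category != "cuda" or "CUDA" in error_message):
--             return category
--     return "default"
--
--
-- def generate_suggested_fix(error_type: str, error_message: str) -> str:
--     """Generate context-specific suggested fixes based on error type."""
--     category = _classify(error_type, error_message)
--     text = _TEXT[category]
--     if category == "import" and "No module named" in error_message:
--         module_name = error_message.split("No module named")[1].strip().strip("'\"")
--         text = f"  - Install missing module: pip install {module_name}\n" + text
--     return text
-- ===== Notes on version B (the rewrite author's own statement) =====
-- stated objective: idiomatic
-- what changed: Replaces A's if/elif chain that builds suggestion lists and joins them per call by a two-stage design: an ordered keyword-to-category classifier plus a lookup table of precomputed, already-joined suggestion texts, with the pip-install line prepended to the import text afterwards.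
import Mathlib
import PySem

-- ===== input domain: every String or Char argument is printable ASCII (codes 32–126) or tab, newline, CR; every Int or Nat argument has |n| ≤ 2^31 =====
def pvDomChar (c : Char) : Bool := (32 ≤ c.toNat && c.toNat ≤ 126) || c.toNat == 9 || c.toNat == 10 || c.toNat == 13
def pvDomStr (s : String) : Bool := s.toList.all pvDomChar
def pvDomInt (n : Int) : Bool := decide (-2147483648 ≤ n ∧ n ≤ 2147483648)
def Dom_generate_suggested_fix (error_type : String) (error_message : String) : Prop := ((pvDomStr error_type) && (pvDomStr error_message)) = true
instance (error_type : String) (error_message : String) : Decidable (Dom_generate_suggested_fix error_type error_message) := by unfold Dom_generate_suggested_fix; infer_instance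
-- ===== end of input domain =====

-- B replaces A's if/elif chain building lists and joining them by a two-stage design:
-- a keyword→category classifier plus a lookup table of precomputed, already-joined
-- suggestion texts, with the pip-install line prepended afterwards (objective: idiomatic).

-- ===== PORT A =====
-- literal transliteration of the if/elif chain; suggestions built branch by branch, joined at the end
def generate_suggested_fix (error_type : String) (error_message : String) : String :=
  let suggestions : List String :=
    if PySem.Str.isIn "ModuleNotFoundError" error_type || PySem.Str.isIn "ImportError" error_type then
      (if PySem.Str.isIn "No module named" error_message then
        let module_name :=
          PySem.Str.stripChars
            (PySem.Str.strip
              (PySem.List.pyGetD ((PySem.Str.split? error_message "No module named").getD []) 1 ""))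
            "'\""
        ["Install missing module: pip install " ++ module_name]
      else []) ++
      ["Ensure all dependencies are installed: pip install -r requirements.txt",
       "If in a virtual environment, ensure it's activated"]
    else if PySem.Str.isIn "MemoryError" error_type then
      ["Lower the grid size N (try reducing by factor of 2)",
       "Current N might be too large for available RAM",
       "Consider using a machine with more RAM or enabling swap",
       "Try setting use_gpu=True if GPU is available"]
    else if PySem.Str.isIn "FileNotFoundError" error_type then
      ["Ensure you're running from the repository root directory",
       "Check that all required files exist in src/core/",
       "Re-clone the repository if files are missing"]
    else if PySem.Str.isIn "RuntimeError" error_type && PySem.Str.isIn "CUDA" error_message then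
      ["GPU/CUDA error detected",
       "Set use_gpu=False in config to use CPU instead",
       "Verify CUDA installation: nvidia-smi"]
    else if PySem.Str.isIn "KeyboardInterrupt" error_type then
      ["Process was interrupted by user (Ctrl+C)",
       "This is normal if you intentionally stopped the process"]
    else
      ["Review the stack trace for specific error location",
       "Check that input parameters are valid",
       "Try running with output_verbosity='debug' for more information"]
  PySem.Str.join "\n" (suggestions.map (fun s => "  - " ++ s))

-- ===== PORT B =====
-- _TEXT: category → precomputed, already-joined suggestion text (Python dict → assoc list)
def pvText : PySem.Dict String String := PySem.Dict.ofList
  [ ("import", "  - Ensure all dependencies are installed: pip install -r requirements.txt\n  - If in a virtual environment, ensure it's activated"),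
    ("memory", "  - Lower the grid size N (try reducing by factor of 2)\n  - Current N might be too large for available RAM\n  - Consider using a machine with more RAM or enabling swap\n  - Try setting use_gpu=True if GPU is available"),
    ("file", "  - Ensure you're running from the repository root directory\n  - Check that all required files exist in src/core/\n  - Re-clone the repository if files are missing"),
    ("cuda", "  - GPU/CUDA error detected\n  - Set use_gpu=False in config to use CPU instead\n  - Verify CUDA installation: nvidia-smi"),
    ("interrupt", "  - Process was interrupted by user (Ctrl+C)\n  - This is normal if you intentionally stopped the process"),
    ("default", "  - Review the stack trace for specific error location\n  - Check that input parameters are valid\n  - Try running with output_verbosity='debug' for more information") ]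

-- _KEYWORDS: ordered keyword → category pairs
def pvKeywords : List (String × String) :=
  [ ("ModuleNotFoundError", "import"), ("ImportError", "import"),
    ("MemoryError", "memory"), ("FileNotFoundError", "file"),
    ("RuntimeError", "cuda"), ("KeyboardInterrupt", "interrupt") ]

-- _classify: first keyword found in error_type (the "cuda" row also requiring "CUDA" in the message)
def pvClassify : List (String × String) → String → String → String
  | [], _, _ => "default"
  | (keyword, category) :: rest, et, em =>
      if PySem.Str.isIn keyword et && (category != "cuda" || PySem.Str.isIn "CUDA" em) then category
      else pvClassify rest et em

def generate_suggested_fix_alt (error_type : String) (error_message : String) : String :=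
  let category := pvClassify pvKeywords error_type error_message
  let text := PySem.Dict.getD pvText category ""
  if category == "import" && PySem.Str.isIn "No module named" error_message then
    let module_name :=
      PySem.Str.stripChars
        (PySem.Str.strip
          (PySem.List.pyGetD ((PySem.Str.split? error_message "No module named").getD []) 1 ""))
        "'\""
    ("  - Install missing module: pip install " ++ module_name ++ "\n") ++ text
  else text

-- ===== PRECONDITION & SPEC =====
def Spec_generate_suggested_fix (error_type : String) (error_message : String) (out : String) : Prop := out = generate_suggested_fix_alt error_type error_message
instance (error_type : String) (error_message : String) (out : String) : Decidable (Spec_generate_suggested_fix error_type error_message out) := by unfold Spec_generate_suggested_fix; infer_instance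

-- ===== CLAIM =====
def Claim_equal_generate_suggested_fix : Prop := ∀ (error_type : String) (error_message : String), Dom_generate_suggested_fix error_type error_message → Spec_generate_suggested_fix error_type error_message (generate_suggested_fix error_type error_message)

-- ===== LEMMAS AND PROOFS =====

-- closed-form evaluations of the six pvText lookups (keeps the Dict out of the main simp)
theorem pvText_import : PySem.Dict.getD pvText "import" "" = "  - Ensure all dependencies are installed: pip install -r requirements.txt\n  - If in a virtual environment, ensure it's activated" := rfl
theorem pvText_memory : PySem.Dict.getD pvText "memory" "" = "  - Lower the grid size N (try reducing by factor of 2)\n  - Current N might be too large for available RAM\n  - Consider using a machine with more RAM or enabling swap\n  - Try setting use_gpu=True if GPU is available" := rfl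
theorem pvText_file : PySem.Dict.getD pvText "file" "" = "  - Ensure you're running from the repository root directory\n  - Check that all required files exist in src/core/\n  - Re-clone the repository if files are missing" := rfl
theorem pvText_cuda : PySem.Dict.getD pvText "cuda" "" = "  - GPU/CUDA error detected\n  - Set use_gpu=False in config to use CPU instead\n  - Verify CUDA installation: nvidia-smi" := rfl
theorem pvText_interrupt : PySem.Dict.getD pvText "interrupt" "" = "  - Process was interrupted by user (Ctrl+C)\n  - This is normal if you intentionally stopped the process" := rfl
theorem pvText_default : PySem.Dict.getD pvText "default" "" = "  - Review the stack trace for specific error location\n  - Check that input parameters are valid\n  - Try running with output_verbosity='debug' for more information" := rfl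

-- ===== VERDICT =====
set_option maxHeartbeats 2000000 in
theorem generate_suggested_fix_spec : Claim_equal_generate_suggested_fix := by
  intro et em _
  unfold Spec_generate_suggested_fix generate_suggested_fix generate_suggested_fix_alt
  by_cases c1 : PySem.Str.isIn "ModuleNotFoundError" et = true <;>
  by_cases c2 : PySem.Str.isIn "ImportError" et = true <;>
  by_cases c3 : PySem.Str.isIn "No module named" em = true <;>
  by_cases c4 : PySem.Str.isIn "MemoryError" et = true <;>
  by_cases c5 : PySem.Str.isIn "FileNotFoundError" et = true <;>
  by_cases c6 : PySem.Str.isIn "RuntimeError" et = true <;>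
  by_cases c7 : PySem.Str.isIn "CUDA" em = true <;>
  by_cases c8 : PySem.Str.isIn "KeyboardInterrupt" et = true <;>
  · apply (String.toList_inj).mp
    simp_all [pvClassify, pvKeywords, pvText_import, pvText_memory, pvText_file, pvText_cuda,
      pvText_interrupt, pvText_default, PySem.Str.join, PySem.Chars.join, List.intercalate]
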